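-- pv_equiv track=rewrite | github.com/AcidQromo/guia_de_tps | tp8/08.py | detector
-- ===== SOURCE A (Python) =====
-- def detector(lst):
--     result = []
--     current_subarray = []
--     max_lenght = 0
--     counter = 0
--     position = []
--
--     for i in range(0, len(lst)):
--         if lst[i] == 0:
--             result.append(current_subarray)
--             current_subarray = []
--         else:
--             current_subarray.append(lst[i])
--
--     if len(current_subarray) != 0:
--         result.append(current_subarray)
--
--
--     for i in range(0, len(result)):
--
--         if max_lenght <= len(result[i]):
--             max_lenght = len(result[i])
--             counter = counter + 1
--
--     for i in range(0, len(result)):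
--         if len(result[i]) == max_lenght:
--             position.append(result[i])
--
--     return position
-- ===== SOURCE B (Python) =====
-- def detector(lst):
--     best = []
--     best_len = 0
--     cur = []
--     for x in lst:
--         if x == 0:
--             if len(cur) > best_len:
--                 best_len = len(cur)
--                 best = [cur]
--             elif len(cur) == best_len:
--                 best.append(cur)
--             cur = []
--         else:
--             cur.append(x)
--     if cur:
--         if len(cur) > best_len:
--             best = [cur]
--         elif len(cur) == best_len:
--             best.append(cur)
--     return best
-- ===== Notes on version B (the rewrite author's own statement) =====
-- stated objective: alternative
-- what changed: A builds the full list of zero-separated segments, then makes two more passes (one to find the maximal length, one to collect segments of that length); B is a single pass that maintains the current run plus the champion length and champion list, finalising a segment at each zero and once for a non-empty trailing run.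
import Mathlib
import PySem

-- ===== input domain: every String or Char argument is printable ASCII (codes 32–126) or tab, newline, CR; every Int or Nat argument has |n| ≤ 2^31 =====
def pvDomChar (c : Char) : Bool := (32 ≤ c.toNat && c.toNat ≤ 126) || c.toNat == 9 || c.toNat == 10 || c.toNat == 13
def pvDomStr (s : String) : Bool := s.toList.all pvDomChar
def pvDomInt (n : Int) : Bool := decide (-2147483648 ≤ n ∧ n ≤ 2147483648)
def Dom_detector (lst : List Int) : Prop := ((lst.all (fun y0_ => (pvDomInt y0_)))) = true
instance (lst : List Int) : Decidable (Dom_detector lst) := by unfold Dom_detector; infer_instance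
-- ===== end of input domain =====

-- B restructures A (segment list + max pass + collect pass) into one pass with a running champion list; same cost, no intermediate segment list.

-- ===== PORT A =====
-- first loop of A: split on zeros, state (result, current_subarray)
def detStepA (st : List (List Int) × List Int) (x : Int) : List (List Int) × List Int :=
  if x = 0 then (st.1 ++ [st.2], []) else (st.1, st.2 ++ [x])

def detector (lst : List Int) : List (List Int) :=
  let st := lst.foldl detStepA ([], [])
  let result := if st.2.length ≠ 0 then st.1 ++ [st.2] else st.1
  -- second loop: max_lenght (counter is dead state in A and dropped here)
  let m := result.foldl (fun m s => if m ≤ s.length then s.length else m) 0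
  -- third loop: collect segments of maximal length
  result.foldl (fun pos s => if s.length = m then pos ++ [s] else pos) []

-- ===== PORT B =====
-- B's segment finalisation: compare a finished run against the champions
def champStep (st : Nat × List (List Int)) (s : List Int) : Nat × List (List Int) :=
  if st.1 < s.length then (s.length, [s])
  else if s.length = st.1 then (st.1, st.2 ++ [s])
  else st

def detStepB (st : List Int × Nat × List (List Int)) (x : Int) : List Int × Nat × List (List Int) :=
  if x = 0 then ([], champStep st.2 st.1) else (st.1 ++ [x], st.2)

def detector_alt (lst : List Int) : List (List Int) :=
  let st := lst.foldl detStepB ([], 0, [])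
  if st.1 ≠ [] then (champStep st.2 st.1).2 else st.2.2

-- ===== PRECONDITION & SPEC =====
def Spec_detector (lst : List Int) (out : List (List Int)) : Prop := out = detector_alt lst
instance (lst : List Int) (out : List (List Int)) : Decidable (Spec_detector lst out) := by unfold Spec_detector; infer_instance

-- ===== CLAIM (what is proved, stated in full; the proofs are below) =====
def Claim_equal_detector : Prop := ∀ (lst : List Int), Dom_detector lst → Spec_detector lst (detector lst)

-- ===== LEMMAS AND PROOFS =====

-- A's first loop: the accumulated result factors out
theorem detStepA_factor (lst : List Int) (res : List (List Int)) (cur : List Int) :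
    lst.foldl detStepA (res, cur) =
      (res ++ (lst.foldl detStepA ([], cur)).1, (lst.foldl detStepA ([], cur)).2) := by
  induction lst generalizing res cur with
  | nil => simp
  | cons x rest ih =>
    by_cases hx : x = 0
    · simp [detStepA, hx]
      rw [ih (res ++ [cur]) [], ih [cur] []]
      simp
    · simp [detStepA, hx]
      exact ih res (cur ++ [x])

-- running max: fold base is a lower bound
theorem foldMax_le (segs : List (List Int)) (bl : Nat) :
    bl ≤ segs.foldl (fun m s => max m s.length) bl := by
  induction segs generalizing bl with
  | nil => simp
  | cons s rest ih => exact le_trans (Nat.le_max_left _ _) (ih _)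

-- B's champion fold computes the max length and the in-order list of maximal segments
theorem champ_foldl (segs : List (List Int)) (bl : Nat) (b : List (List Int)) :
    segs.foldl champStep (bl, b) =
      (segs.foldl (fun m s => max m s.length) bl,
       (if bl = segs.foldl (fun m s => max m s.length) bl then b else []) ++
         segs.filter (fun s => s.length == segs.foldl (fun m s => max m s.length) bl)) := by
  induction segs generalizing bl b with
  | nil => simp
  | cons s rest ih =>
    have hM : ∀ b0 : Nat, (s :: rest).foldl (fun m t => max m t.length) b0
        = rest.foldl (fun m t => max m t.length) (max b0 s.length) := by intro b0; simp
    by_cases h1 : bl < s.length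
    · have hmax : max bl s.length = s.length := Nat.max_eq_right (le_of_lt h1)
      have hlt : bl < rest.foldl (fun m t => max m t.length) s.length :=
        lt_of_lt_of_le h1 (foldMax_le rest s.length)
      simp only [List.foldl_cons, champStep, if_pos h1, hM, hmax]
      rw [ih]
      simp only [Prod.mk.injEq, List.filter_cons, true_and]
      rw [if_neg (Nat.ne_of_lt hlt)]
      by_cases he : s.length = rest.foldl (fun m t => max m t.length) s.length
      · rw [if_pos he, if_pos (beq_iff_eq.mpr he)]
        simp
      · rw [if_neg he, if_neg (by simp only [beq_iff_eq]; exact he :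
          ¬ ((s.length == rest.foldl (fun m t => max m t.length) s.length) = true))]
    · by_cases h2 : s.length = bl
      · have hmax : max bl s.length = bl := Nat.max_eq_left (h2 ▸ le_refl _)
        simp only [List.foldl_cons, champStep, if_neg h1, if_pos h2, hM, hmax]
        rw [ih]
        simp only [Prod.mk.injEq, List.filter_cons, true_and]
        by_cases hb : bl = rest.foldl (fun m t => max m t.length) bl
        · have hs : s.length = rest.foldl (fun m t => max m t.length) bl := h2.trans hb
          rw [if_pos hb, if_pos hb, if_pos (beq_iff_eq.mpr hs)]
          simp
        · have hs : ¬ s.length = rest.foldl (fun m t => max m t.length) bl := by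
            intro h; exact hb (h2 ▸ h)
          rw [if_neg hb, if_neg hb, if_neg (by simp only [beq_iff_eq]; exact hs :
            ¬ ((s.length == rest.foldl (fun m t => max m t.length) bl) = true))]
      · have hlt2 : s.length < bl := by omega
        have hmax : max bl s.length = bl := Nat.max_eq_left (le_of_lt hlt2)
        simp only [List.foldl_cons, champStep, if_neg h1, if_neg h2, hM, hmax]
        rw [ih]
        simp only [Prod.mk.injEq, List.filter_cons, true_and]
        have hble : bl ≤ rest.foldl (fun m t => max m t.length) bl := foldMax_le rest _
        have hs : ¬ s.length = rest.foldl (fun m t => max m t.length) bl := by omega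
        rw [if_neg (by simp only [beq_iff_eq]; exact hs :
          ¬ ((s.length == rest.foldl (fun m t => max m t.length) bl) = true))]

-- relate B's single pass to A's split loop followed by the champion fold
theorem loopB_eq (lst : List Int) (cur : List Int) (bl : Nat) (b : List (List Int)) :
    lst.foldl detStepB (cur, bl, b) =
      ((lst.foldl detStepA ([], cur)).2,
       (lst.foldl detStepA ([], cur)).1.foldl champStep (bl, b)) := by
  induction lst generalizing cur bl b with
  | nil => simp
  | cons x rest ih =>
    by_cases hx : x = 0
    · subst hx
      have hB : detStepB (cur, bl, b) 0 = ([], champStep (bl, b) cur) := by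
        simp [detStepB]
      have hA : detStepA ([], cur) 0 = ([cur], []) := by
        simp [detStepA]
      simp only [List.foldl_cons, hB, hA]
      rw [ih [] (champStep (bl, b) cur).1 (champStep (bl, b) cur).2]
      rw [detStepA_factor rest [cur] []]
      simp
    · have hB : detStepB (cur, bl, b) x = (cur ++ [x], bl, b) := by
        simp [detStepB, hx]
      have hA : detStepA ([], cur) x = ([], cur ++ [x]) := by
        simp [detStepA, hx]
      simp only [List.foldl_cons, hB, hA]
      exact ih (cur ++ [x]) bl b

-- A's second loop is the running-max fold
theorem maxloop_eq (segs : List (List Int)) (b0 : Nat) :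
    segs.foldl (fun m s => if m ≤ s.length then s.length else m) b0
      = segs.foldl (fun m s => max m s.length) b0 := by
  induction segs generalizing b0 with
  | nil => rfl
  | cons s rest ih =>
    simp only [List.foldl_cons]
    rw [ih]
    have : (if b0 ≤ s.length then s.length else b0) = max b0 s.length := Nat.max_def.symm
    rw [this]

-- A's third loop is a filter
theorem collectloop_eq (segs : List (List Int)) (m : Nat) (acc : List (List Int)) :
    segs.foldl (fun pos s => if s.length = m then pos ++ [s] else pos) acc
      = acc ++ segs.filter (fun s => s.length == m) := by
  induction segs generalizing acc with
  | nil => simp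
  | cons s rest ih =>
    simp only [List.foldl_cons, List.filter_cons]
    by_cases h : s.length = m
    · simp [h, ih]
    · simp [h, ih]

-- both sides as filter-by-max of A's result list
theorem both_eq (lst : List Int) : detector lst = detector_alt lst := by
  simp only [detector, detector_alt]
  rw [loopB_eq]
  set st := lst.foldl detStepA ([], []) with hst
  by_cases hc : st.2 = []
  · have h1 : ¬ st.2.length ≠ 0 := by simp [hc]
    rw [if_neg h1, if_neg (by simp [hc] : ¬ st.2 ≠ [])]
    rw [maxloop_eq, collectloop_eq, champ_foldl]
    simp [ite_self]
  · have h1 : st.2.length ≠ 0 := by simpa using hc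
    rw [if_pos h1, if_pos hc]
    rw [maxloop_eq, collectloop_eq]
    have h2 : champStep (st.1.foldl champStep (0, [])) st.2
        = (st.1 ++ [st.2]).foldl champStep (0, []) := by
      rw [List.foldl_append]; rfl
    rw [h2, champ_foldl]
    simp [ite_self]

-- ===== VERDICT (by name: the statement is the Claim_ definition above) =====
theorem detector_spec : Claim_equal_detector := by
  intro lst _
  unfold Spec_detector
  exact both_eq lst
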